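-- pv_equiv track=rewrite | github.com/arianahejazyan/chess-engine | Nyx/chess_rules/magic_numbers.py | bishop_attacks_on_fly
-- ===== SOURCE A (Python) =====
-- def bishop_attacks_on_fly(square: int, block: int) -> int:
--
--     attacks = 0
--
--     r = square // 14 # rank
--     f = square % 14  # file
--
--     for d in range(1, min(13 - r,13 - f)):
--         attacks ^= (1 << square + d * 15) # Up-Right Direction
--         if (1 << square + d * 15) & block: break
--
--     for d in range(1, min(r,f)):
--         attacks ^= (1 << square - d * 15) # Down-Left Direction
--         if (1 << square - d * 15) & block: break
--
--     for d in range(1, min(13 - r,f)):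
--         attacks ^= (1 << square + d * 13) # Up-Left Direction
--         if (1 << square + d * 13) & block: break
--
--     for d in range(1, min(r,13 - f)):
--         attacks ^= (1 << square - d * 13) # Down-Right Direction
--         if (1 << square - d * 13) & block: break
--
--     return attacks
-- ===== SOURCE B (Python) =====
-- def bishop_attacks_on_fly(square: int, block: int) -> int:
--
--     attacks = 0
--
--     r, f = divmod(square, 14)
--
--     for step, n in ((15, min(13 - r, 13 - f)),   # up-right
--                     (-15, min(r, f)),            # down-left
--                     (13, min(13 - r, f)),        # up-left
--                     (-13, min(r, 13 - f))):      # down-right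
--         # stage 1: how far the ray reaches (nearest blocker, inclusive);
--         # scanning far -> near lets the nearest blocker overwrite, no break needed
--         reach = n - 1
--         for d in range(n - 1, 0, -1):
--             if (1 << (square + d * step)) & block:
--                 reach = d
--         # stage 2: emit exactly that prefix of the ray
--         for d in range(1, reach + 1):
--             attacks ^= 1 << (square + d * step)
--
--     return attacks
-- ===== Notes on version B (the rewrite author's own statement) =====
-- stated objective: alternative
-- what changed: Replaced A's four unrolled single-pass loops that XOR bits while scanning outward and break at the first blocker by a staged two-pass scheme per diagonal: pass 1 scans the ray from the board edge back toward the piece computing the reach (nearest blocker overwrites, no break/early exit), pass 2 then emits exactly that prefix of the ray.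
import Mathlib
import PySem

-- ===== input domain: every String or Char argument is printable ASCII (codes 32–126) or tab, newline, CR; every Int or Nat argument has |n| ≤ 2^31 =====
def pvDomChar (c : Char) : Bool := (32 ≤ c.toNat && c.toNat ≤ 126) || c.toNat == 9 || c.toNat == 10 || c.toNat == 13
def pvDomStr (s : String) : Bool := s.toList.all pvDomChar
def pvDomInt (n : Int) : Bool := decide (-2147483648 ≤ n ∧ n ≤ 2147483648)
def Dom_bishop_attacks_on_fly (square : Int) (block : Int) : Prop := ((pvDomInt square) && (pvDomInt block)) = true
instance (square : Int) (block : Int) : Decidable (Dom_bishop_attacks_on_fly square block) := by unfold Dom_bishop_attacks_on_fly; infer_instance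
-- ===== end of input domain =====

-- B replaces A's single forward scan-with-break per ray by two staged passes per ray:
-- a reverse reach-finding pass (nearest blocker overwrites) and a prefix-emitting pass.

-- ===== PORT A =====
-- one 'for d in range(1, m): attacks ^= 1 << (square + d*mult); if … & block: break' loop of A
-- ('1 << k' is 1 <<< k.toNat, exact since Pre_ keeps every executed shift ≥ 0)
def pvLoopA (square : Int) (mult : Int) (block : Int) : List Int → Int → Int
  | [], attacks => attacks
  | d :: ds, attacks =>
    let bit := (1 : Int) <<< (square + d * mult).toNat
    let att := PySem.Int.bxor attacks bit
    if PySem.Int.band bit block ≠ 0 then att else pvLoopA square mult block ds att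

def bishop_attacks_on_fly (square : Int) (block : Int) : Int :=
  let r := PySem.Int.floordiv square 14
  let f := PySem.Int.mod square 14
  let a1 := pvLoopA square 15 block (PySem.List.pyRange 1 (min (13 - r) (13 - f)) 1) 0
  let a2 := pvLoopA square (-15) block (PySem.List.pyRange 1 (min r f) 1) a1
  let a3 := pvLoopA square 13 block (PySem.List.pyRange 1 (min (13 - r) f) 1) a2
  pvLoopA square (-13) block (PySem.List.pyRange 1 (min r (13 - f)) 1) a3

-- ===== PORT B =====
-- per direction: stage 1 folds range(n-1, 0, -1) to find the reach, stage 2 folds range(1, reach+1)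
def bishop_attacks_on_fly_alt (square : Int) (block : Int) : Int :=
  let r := PySem.Int.floordiv square 14
  let f := PySem.Int.mod square 14
  [((15 : Int), min (13 - r) (13 - f)), (-15, min r f), (13, min (13 - r) f), (-13, min r (13 - f))].foldl
    (fun attacks sn =>
      let reach := (PySem.List.pyRange (sn.2 - 1) 0 (-1)).foldl
        (fun reach d =>
          if PySem.Int.band ((1 : Int) <<< (square + d * sn.1).toNat) block ≠ 0 then d else reach)
        (sn.2 - 1)
      (PySem.List.pyRange 1 (reach + 1) 1).foldl
        (fun acc d => PySem.Int.bxor acc ((1 : Int) <<< (square + d * sn.1).toNat)) attacks) 0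

-- ===== PRECONDITION & SPEC =====
-- Pre_ excludes exactly the inputs on which A raises ValueError (a ray's first '1 << shift'
-- has a negative shift; up-ray shifts grow, so only the first matters, and the down-ray loops
-- are empty whenever square < 0); B raises the same ValueError there.
def Pre_bishop_attacks_on_fly (square : Int) (block : Int) : Prop :=
  (1 < min (13 - PySem.Int.floordiv square 14) (13 - PySem.Int.mod square 14) → 0 ≤ square + 15) ∧
  (1 < min (13 - PySem.Int.floordiv square 14) (PySem.Int.mod square 14) → 0 ≤ square + 13)
instance (square : Int) (block : Int) : Decidable (Pre_bishop_attacks_on_fly square block) := by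
  unfold Pre_bishop_attacks_on_fly; infer_instance

def pvWitness_bishop_attacks_on_fly : Int × Int := (97, 8192)

def Spec_bishop_attacks_on_fly (square : Int) (block : Int) (out : Int) : Prop := out = bishop_attacks_on_fly_alt square block
instance (square : Int) (block : Int) (out : Int) : Decidable (Spec_bishop_attacks_on_fly square block out) := by unfold Spec_bishop_attacks_on_fly; infer_instance

-- ===== CLAIM (what is proved, stated in full; the proofs are below) =====
def Claim_equal_bishop_attacks_on_fly : Prop := ∀ (square : Int) (block : Int), Dom_bishop_attacks_on_fly square block → Pre_bishop_attacks_on_fly square block → Spec_bishop_attacks_on_fly square block (bishop_attacks_on_fly square block)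

-- ===== LEMMAS AND PROOFS =====

-- least d in [i, b] whose ray bit hits block, else the default r0 (proof-side spec of both loops)
def pvF (square mult block : Int) (i b r0 : Int) : Int :=
  if h : i ≤ b then
    if PySem.Int.band ((1 : Int) <<< (square + i * mult).toNat) block ≠ 0 then i
    else pvF square mult block (i + 1) b r0
  else r0
termination_by (b + 1 - i).toNat
decreasing_by omega

theorem pvF_lb (square mult block : Int) : ∀ (fuel : Nat) (i b r0 : Int),
    (b + 1 - i).toNat ≤ fuel → min i r0 ≤ pvF square mult block i b r0 := by
  intro fuel
  induction fuel with
  | zero =>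
    intro i b r0 h
    rw [pvF, dif_neg (by omega)]; omega
  | succ fuel ih =>
    intro i b r0 h
    rw [pvF]
    by_cases hib : i ≤ b
    · rw [dif_pos hib]
      split
      · omega
      · have := ih (i + 1) b r0 (by omega); omega
    · rw [dif_neg hib]; omega

theorem pvF_ub (square mult block : Int) : ∀ (fuel : Nat) (i b r0 : Int),
    (b + 1 - i).toNat ≤ fuel → pvF square mult block i b r0 ≤ max b r0 := by
  intro fuel
  induction fuel with
  | zero =>
    intro i b r0 h
    rw [pvF, dif_neg (by omega)]; omega
  | succ fuel ih =>
    intro i b r0 h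
    rw [pvF]
    by_cases hib : i ≤ b
    · rw [dif_pos hib]
      split
      · omega
      · exact ih (i + 1) b r0 (by omega)
    · rw [dif_neg hib]; omega

-- A's loop over range(1, n) equals the plain xor-fold over the prefix range(i, F+1)
theorem pvA_char (square mult block : Int) : ∀ (fuel : Nat) (i n acc : Int),
    (n - i).toNat ≤ fuel →
    pvLoopA square mult block (PySem.List.pyRange i n 1) acc
      = (PySem.List.pyRange i (min n (pvF square mult block i (n - 1) (n - 1) + 1)) 1).foldl
          (fun a d => PySem.Int.bxor a ((1 : Int) <<< (square + d * mult).toNat)) acc := by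
  intro fuel
  induction fuel with
  | zero =>
    intro i n acc h
    have hni : n ≤ i := by omega
    rw [pvF, dif_neg (by omega)]
    rw [PySem.List.pyRange_one_eq_nil hni, PySem.List.pyRange_one_eq_nil (by omega)]
    rfl
  | succ fuel ih =>
    intro i n acc h
    by_cases hin : i < n
    · rw [PySem.List.pyRange_one_cons hin, pvLoopA]
      rw [pvF, dif_pos (by omega)]
      by_cases hb : PySem.Int.band ((1 : Int) <<< (square + i * mult).toNat) block ≠ 0
      · rw [if_pos hb, if_pos hb]
        have hmin : min n (i + 1) = i + 1 := by omega
        rw [hmin, PySem.List.pyRange_one_cons (by omega), PySem.List.pyRange_one_eq_nil (by omega)]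
        rfl
      · rw [if_neg hb, if_neg hb]
        have hlb := pvF_lb square mult block (n - i - 1).toNat (i + 1) (n - 1) (n - 1) (by omega)
        have hcons : PySem.List.pyRange i (min n (pvF square mult block (i + 1) (n - 1) (n - 1) + 1)) 1
            = i :: PySem.List.pyRange (i + 1) (min n (pvF square mult block (i + 1) (n - 1) (n - 1) + 1)) 1 :=
          PySem.List.pyRange_one_cons (by omega)
        rw [hcons, List.foldl_cons]
        exact ih (i + 1) n _ (by omega)
    · rw [pvF, dif_neg (by omega), PySem.List.pyRange_one_eq_nil (by omega),
          PySem.List.pyRange_one_eq_nil (by omega)]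
      rfl

-- shrinking the scanned interval from the top folds the top element into the default
theorem pvF_shrink (square mult block : Int) : ∀ (fuel : Nat) (i m r0 : Int),
    (m - i).toNat ≤ fuel → i ≤ m →
    pvF square mult block i m r0
      = pvF square mult block i (m - 1)
          (if PySem.Int.band ((1 : Int) <<< (square + m * mult).toNat) block ≠ 0 then m else r0) := by
  intro fuel
  induction fuel with
  | zero =>
    intro i m r0 h him
    have heq : i = m := by omega
    subst heq
    rw [pvF, dif_pos le_rfl]
    by_cases hb : PySem.Int.band ((1 : Int) <<< (square + i * mult).toNat) block ≠ 0
    · rw [if_pos hb]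
      conv_rhs => rw [pvF]
      rw [dif_neg (by omega : ¬ i ≤ i - 1), if_pos hb]
    · rw [if_neg hb, pvF, dif_neg (by omega : ¬ i + 1 ≤ i)]
      conv_rhs => rw [pvF]
      rw [dif_neg (by omega : ¬ i ≤ i - 1), if_neg hb]
  | succ fuel ih =>
    intro i m r0 h him
    by_cases heq : i = m
    · subst heq
      rw [pvF, dif_pos le_rfl]
      by_cases hb : PySem.Int.band ((1 : Int) <<< (square + i * mult).toNat) block ≠ 0
      · rw [if_pos hb]
        conv_rhs => rw [pvF]
        rw [dif_neg (by omega : ¬ i ≤ i - 1), if_pos hb]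
      · rw [if_neg hb, pvF, dif_neg (by omega : ¬ i + 1 ≤ i)]
        conv_rhs => rw [pvF]
        rw [dif_neg (by omega : ¬ i ≤ i - 1), if_neg hb]
    · have hlt : i < m := by omega
      rw [pvF, dif_pos him]
      conv_rhs => rw [pvF]
      rw [dif_pos (by omega : i ≤ m - 1)]
      by_cases hb : PySem.Int.band ((1 : Int) <<< (square + i * mult).toNat) block ≠ 0
      · rw [if_pos hb, if_pos hb]
      · rw [if_neg hb, if_neg hb]
        exact ih (i + 1) m r0 (by omega) (by omega)

-- B's reverse reach-finding pass computes pvF 1 m r0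
theorem pvB_reach (square mult block : Int) : ∀ (fuel : Nat) (m r0 : Int),
    m.toNat ≤ fuel →
    (PySem.List.pyRange m 0 (-1)).foldl
        (fun reach d =>
          if PySem.Int.band ((1 : Int) <<< (square + d * mult).toNat) block ≠ 0 then d else reach) r0
      = pvF square mult block 1 m r0 := by
  intro fuel
  induction fuel with
  | zero =>
    intro m r0 h
    rw [PySem.List.pyRange_neg_one_eq_nil (by omega), pvF, dif_neg (by omega)]
    rfl
  | succ fuel ih =>
    intro m r0 h
    by_cases hm : 0 < m
    · rw [PySem.List.pyRange_neg_one_cons hm, List.foldl_cons]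
      rw [ih (m - 1) _ (by omega)]
      exact (pvF_shrink square mult block m.toNat 1 m r0 (by omega) (by omega)).symm
    · rw [PySem.List.pyRange_neg_one_eq_nil (by omega), pvF, dif_neg (by omega)]
      rfl

-- per-direction equality of A's break-loop and B's two staged passes
theorem pvDir_eq (square mult block n acc : Int) :
    pvLoopA square mult block (PySem.List.pyRange 1 n 1) acc
      = (PySem.List.pyRange 1
            ((PySem.List.pyRange (n - 1) 0 (-1)).foldl
              (fun reach d =>
                if PySem.Int.band ((1 : Int) <<< (square + d * mult).toNat) block ≠ 0 then d else reach)
              (n - 1) + 1) 1).foldl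
          (fun a d => PySem.Int.bxor a ((1 : Int) <<< (square + d * mult).toNat)) acc := by
  rw [pvB_reach square mult block (n - 1).toNat (n - 1) (n - 1) (by omega)]
  rw [pvA_char square mult block (n - 1).toNat 1 n acc (by omega)]
  have hub := pvF_ub square mult block (n - 1).toNat 1 (n - 1) (n - 1) (by omega)
  have hmin : min n (pvF square mult block 1 (n - 1) (n - 1) + 1)
      = pvF square mult block 1 (n - 1) (n - 1) + 1 := by omega
  rw [hmin]

-- ===== VERDICT (by name: the statement is the Claim_ definition above) =====
theorem bishop_attacks_on_fly_spec : Claim_equal_bishop_attacks_on_fly := by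
  intro square block _ _
  unfold Spec_bishop_attacks_on_fly bishop_attacks_on_fly bishop_attacks_on_fly_alt
  simp only [List.foldl]
  rw [pvDir_eq, pvDir_eq, pvDir_eq, pvDir_eq]
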